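-- pv_equiv track=rewrite | github.com/dwhitlockii/host2me | scoring_pass.py | count_strong_signals
-- ===== SOURCE A (Python) =====
-- SECONDARY_KEYWORDS = [
--     'infrastructure', 'scalable solutions', 'enterprise hosting', 'platform', 'managed', 'cloud web', 'virtual server'
-- ]
--
-- CONTEXT_MODIFIERS = [
--     'plans', 'pricing', 'datacenter', 'uptime', 'specs', 'features', 'tiers', 'comparison', 'sla'
-- ]
--
-- TECH_KEYWORDS = [
--     'cpanel', 'plesk', 'whmcs', 'blesta', 'clientexec', 'kvm', 'xen', 'docker', 'kubernetes', 'aws', 'azure', 'google cloud'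
-- ]
--
-- def count_strong_signals(row, snippets, links):
--     strong = 0
--     # Careers/jobs link
--     if any('career' in l or 'job' in l for l in links):
--         strong += 1
--     # Tech keyword
--     if any(tk in s for tk in TECH_KEYWORDS for s in snippets):
--         strong += 1
--     # Multiple secondary/contextual
--     sec_count = 0
--     for sec in SECONDARY_KEYWORDS:
--         for snip in snippets:
--             if sec in snip:
--                 for mod in CONTEXT_MODIFIERS:
--                     if mod in snip:
--                         sec_count += 1
--     if sec_count >= 2:
--         strong += 1
--     return strong
-- ===== SOURCE B (Python) =====
-- SECONDARY_KEYWORDS = [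
--     'infrastructure', 'scalable solutions', 'enterprise hosting', 'platform', 'managed', 'cloud web', 'virtual server'
-- ]
--
-- CONTEXT_MODIFIERS = [
--     'plans', 'pricing', 'datacenter', 'uptime', 'specs', 'features', 'tiers', 'comparison', 'sla'
-- ]
--
-- TECH_KEYWORDS = [
--     'cpanel', 'plesk', 'whmcs', 'blesta', 'clientexec', 'kvm', 'xen', 'docker', 'kubernetes', 'aws', 'azure', 'google cloud'
-- ]
--
-- def count_strong_signals(row, snippets, links):
--     # One pass over snippets: per-snippet keyword counts; sec contribution is s_cnt * c_cnt.
--     tech_found = False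
--     sec_count = 0
--     for s in snippets:
--         tech_found = tech_found or any(tk in s for tk in TECH_KEYWORDS)
--         s_cnt = len([k for k in SECONDARY_KEYWORDS if k in s])
--         c_cnt = len([m for m in CONTEXT_MODIFIERS if m in s])
--         sec_count += s_cnt * c_cnt
--     link = any('career' in l or 'job' in l for l in links)
--     return int(tech_found) + int(sec_count >= 2) + int(link)
-- ===== Notes on version B (the rewrite author's own statement) =====
-- stated objective: alternative
-- what changed: B replaces A's two separate keyword-outer nested scans with one pass over snippets that keeps a tech flag and adds s_cnt*c_cnt (secondary-matches times context-matches) per snippet, computing the three flags independently.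
import Mathlib
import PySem

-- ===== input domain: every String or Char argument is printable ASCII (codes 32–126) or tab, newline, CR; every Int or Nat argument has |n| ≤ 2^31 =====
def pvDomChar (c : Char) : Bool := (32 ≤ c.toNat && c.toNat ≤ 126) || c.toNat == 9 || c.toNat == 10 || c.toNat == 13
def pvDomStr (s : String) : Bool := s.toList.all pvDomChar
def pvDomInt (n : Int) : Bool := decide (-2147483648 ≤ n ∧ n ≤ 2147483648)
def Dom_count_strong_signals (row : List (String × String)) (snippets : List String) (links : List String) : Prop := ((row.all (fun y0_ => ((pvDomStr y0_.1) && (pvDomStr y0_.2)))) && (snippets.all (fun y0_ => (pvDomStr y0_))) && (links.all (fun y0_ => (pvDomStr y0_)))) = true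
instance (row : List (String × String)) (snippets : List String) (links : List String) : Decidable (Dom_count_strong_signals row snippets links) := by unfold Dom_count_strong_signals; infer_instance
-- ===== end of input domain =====

-- ===== PORT A =====
-- One honest line: B fuses A's two keyword-outer nested snippet scans into a single pass over snippets (alternative decomposition, same cost).
def pvSecondary : List String := ["infrastructure", "scalable solutions", "enterprise hosting", "platform", "managed", "cloud web", "virtual server"]
def pvContext : List String := ["plans", "pricing", "datacenter", "uptime", "specs", "features", "tiers", "comparison", "sla"]
def pvTech : List String := ["cpanel", "plesk", "whmcs", "blesta", "clientexec", "kvm", "xen", "docker", "kubernetes", "aws", "azure", "google cloud"]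

def count_strong_signals (row : List (String × String)) (snippets : List String) (links : List String) : Int :=
  let strong : Int := 0
  let strong := if links.any (fun l => PySem.Str.isIn "career" l || PySem.Str.isIn "job" l) then strong + 1 else strong
  let strong := if pvTech.any (fun tk => snippets.any (fun s => PySem.Str.isIn tk s)) then strong + 1 else strong
  let sec_count : Int :=
    pvSecondary.foldl (fun acc sec =>
      snippets.foldl (fun acc snip =>
        if PySem.Str.isIn sec snip then
          pvContext.foldl (fun acc mod => if PySem.Str.isIn mod snip then acc + 1 else acc) acc
        else acc) acc) 0
  let strong := if sec_count ≥ 2 then strong + 1 else strong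
  strong

-- ===== PORT B =====
def count_strong_signals_alt (row : List (String × String)) (snippets : List String) (links : List String) : Int :=
  let st := snippets.foldl (fun (st : Bool × Int) s =>
    let tech_found := st.1 || pvTech.any (fun tk => PySem.Str.isIn tk s)
    let s_cnt : Int := (pvSecondary.filter (fun k => PySem.Str.isIn k s)).length
    let c_cnt : Int := (pvContext.filter (fun m => PySem.Str.isIn m s)).length
    (tech_found, st.2 + s_cnt * c_cnt)) (false, 0)
  let link := links.any (fun l => PySem.Str.isIn "career" l || PySem.Str.isIn "job" l)
  (if st.1 then (1 : Int) else 0) + (if st.2 ≥ 2 then 1 else 0) + (if link then 1 else 0)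

-- ===== PRECONDITION & SPEC =====

def Spec_count_strong_signals (row : List (String × String)) (snippets : List String) (links : List String) (out : Int) : Prop := out = count_strong_signals_alt row snippets links
instance (row : List (String × String)) (snippets : List String) (links : List String) (out : Int) : Decidable (Spec_count_strong_signals row snippets links out) := by unfold Spec_count_strong_signals; infer_instance

-- ===== CLAIM (what is proved, stated in full; the proofs are below) =====
def Claim_equal_count_strong_signals : Prop := ∀ (row : List (String × String)) (snippets : List String) (links : List String), Dom_count_strong_signals row snippets links → Spec_count_strong_signals row snippets links (count_strong_signals row snippets links)

-- ===== LEMMAS AND PROOFS =====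

-- counting foldl ('if p x: acc += 1') as a filter length
theorem pv_foldl_count {α : Type} (p : α → Bool) :
    ∀ (l : List α) (a : Int),
      l.foldl (fun a x => if p x then a + 1 else a) a = a + ((l.filter p).length : Int) := by
  intro l
  induction l with
  | nil => intro a; simp
  | cons x t ih =>
    intro a
    by_cases h : p x = true <;> simp [List.foldl_cons, List.filter_cons, h, ih] <;> push_cast <;> ring

-- a foldl whose step adds g x is init + sum of g over the list
theorem pv_foldl_step_add {α : Type} (f : Int → α → Int) (g : α → Int)
    (h : ∀ a x, f a x = a + g x) :
    ∀ (l : List α) (a : Int), l.foldl f a = a + (l.map g).sum := by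
  intro l
  induction l with
  | nil => intro a; simp
  | cons x t ih => intro a; simp [List.foldl_cons, h, ih]; ring

-- sum over a map splits over pointwise addition
theorem pv_sum_map_add {α : Type} (f g : α → Int) :
    ∀ (l : List α), (l.map (fun x => f x + g x)).sum = (l.map f).sum + (l.map g).sum := by
  intro l
  induction l with
  | nil => simp
  | cons x t ih => simp [ih]; ring

-- Fubini for list sums
theorem pv_sum_swap {α β : Type} (F : α → β → Int) (m : List β) :
    ∀ (l : List α),
      (l.map (fun x => (m.map (fun y => F x y)).sum)).sum
        = (m.map (fun y => (l.map (fun x => F x y)).sum)).sum := by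
  intro l
  induction l with
  | nil => simp
  | cons x t ih =>
    simp only [List.map_cons, List.sum_cons, ih, List.map_cons]
    rw [← pv_sum_map_add]
  -- sum of if-then-c-else-0 is (matches) * c

theorem pv_sum_if_const {α : Type} (p : α → Bool) (c : Int) :
    ∀ (l : List α), (l.map (fun x => if p x then c else 0)).sum = ((l.filter p).length : Int) * c := by
  intro l
  induction l with
  | nil => simp
  | cons x t ih =>
    by_cases h : p x = true <;> simp [List.filter_cons, h, ih] <;> push_cast <;> ring

-- any over the outer list commutes with any over the inner list
theorem pv_any_swap {α β : Type} (p : α → β → Bool) (l : List α) (m : List β) :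
    l.any (fun a => m.any (fun b => p a b)) = m.any (fun b => l.any (fun a => p a b)) := by
  rw [Bool.eq_iff_iff]
  simp only [List.any_eq_true]
  tauto

-- a pair foldl with independent components splits
theorem pv_pair_foldl {α : Type} (fb : Bool → α → Bool) (fn : Int → α → Int) :
    ∀ (l : List α) (b : Bool) (n : Int),
      l.foldl (fun (st : Bool × Int) x => (fb st.1 x, fn st.2 x)) (b, n)
        = (l.foldl fb b, l.foldl fn n) := by
  intro l
  induction l with
  | nil => intro b n; simp
  | cons x t ih => intro b n; simp [List.foldl_cons, ih]

theorem pv_foldl_or {α : Type} (p : α → Bool) :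
    ∀ (l : List α) (b : Bool), l.foldl (fun b x => b || p x) b = (b || l.any p) := by
  intro l
  induction l with
  | nil => intro b; simp
  | cons x t ih => intro b; simp [List.foldl_cons, ih, Bool.or_assoc]

-- A's triply nested sec_count loop equals B's per-snippet product sum
theorem pv_sec_count_eq (snippets : List String) :
    pvSecondary.foldl (fun acc sec =>
      snippets.foldl (fun acc snip =>
        if PySem.Str.isIn sec snip then
          pvContext.foldl (fun acc mod => if PySem.Str.isIn mod snip then acc + 1 else acc) acc
        else acc) acc) 0
    = (snippets.map (fun s =>
        ((pvSecondary.filter (fun k => PySem.Str.isIn k s)).length : Int)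
          * ((pvContext.filter (fun m => PySem.Str.isIn m s)).length : Int))).sum := by
  have hmid : ∀ (sec : String) (a : Int),
      snippets.foldl (fun acc snip =>
        if PySem.Str.isIn sec snip then
          pvContext.foldl (fun acc mod => if PySem.Str.isIn mod snip then acc + 1 else acc) acc
        else acc) a
      = a + (snippets.map (fun snip =>
          if PySem.Str.isIn sec snip
          then ((pvContext.filter (fun m => PySem.Str.isIn m snip)).length : Int) else 0)).sum := by
    intro sec a
    apply pv_foldl_step_add
    intro a snip
    simp only [PySem.Str.isIn_eq]
    by_cases h : PySem.Chars.isIn sec.toList snip.toList = true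
    · rw [if_pos h, if_pos h]
      exact pv_foldl_count (fun m => PySem.Chars.isIn m.toList snip.toList) pvContext a
    · rw [if_neg h, if_neg h]; ring
  rw [pv_foldl_step_add _
        (fun sec => (snippets.map (fun snip =>
          if PySem.Str.isIn sec snip
          then ((pvContext.filter (fun m => PySem.Str.isIn m snip)).length : Int) else 0)).sum)
        (fun a sec => hmid sec a)]
  rw [pv_sum_swap]
  simp only [zero_add]
  apply congrArg List.sum
  apply List.map_congr_left
  intro s _
  rw [pv_sum_if_const]

-- ===== VERDICT (by name: the statement is the Claim_ definition above) =====
theorem count_strong_signals_spec : Claim_equal_count_strong_signals := by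
  intro row snippets links _
  unfold Spec_count_strong_signals count_strong_signals count_strong_signals_alt
  simp only []
  rw [pv_pair_foldl (fun b s => b || pvTech.any (fun tk => PySem.Str.isIn tk s))
        (fun n s => n + ((pvSecondary.filter (fun k => PySem.Str.isIn k s)).length : Int)
          * ((pvContext.filter (fun m => PySem.Str.isIn m s)).length : Int))]
  rw [pv_foldl_or, Bool.false_or]
  rw [pv_foldl_step_add
        (fun n s => n + ((pvSecondary.filter (fun k => PySem.Str.isIn k s)).length : Int)
          * ((pvContext.filter (fun m => PySem.Str.isIn m s)).length : Int))
        (fun s => ((pvSecondary.filter (fun k => PySem.Str.isIn k s)).length : Int)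
          * ((pvContext.filter (fun m => PySem.Str.isIn m s)).length : Int))
        (fun _ _ => rfl)]
  rw [pv_sec_count_eq, pv_any_swap (fun tk s => PySem.Str.isIn tk s)]
  simp only [zero_add]
  split_ifs <;> ring
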